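-- pv_equiv track=rewrite | github.com/Appolloyon/Rediting | rediting/util/sequence.py | trim_sequence
-- ===== SOURCE A (Python) =====
-- def trim_sequence(seq,indices):
--     """Returns a sequence lacking residues corresponding to indices"""
--     new_seq = ''
--     # Use enumerate to match index to each base
--     for i,res in enumerate(seq):
--         if i in indices:
--             # Just don't add it, same as deleting
--             pass
--         else:
--             new_seq += res
--     return new_seq
-- ===== SOURCE B (Python) =====
-- def trim_sequence(seq, indices):
--     """Returns a sequence lacking residues corresponding to indices"""
--     positions = sorted(set(i for i in indices if 0 <= i < len(seq)))
--     parts = []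
--     prev = 0
--     for pos in positions:
--         parts.append(seq[prev:pos])
--         prev = pos + 1
--     parts.append(seq[prev:])
--     return ''.join(parts)
-- ===== Notes on version B (the rewrite author's own statement) =====
-- stated objective: faster
-- what changed: Instead of scanning every character and testing its index against the indices list, B sorts the distinct in-range removal positions once and reconstructs the result by slicing out the kept runs between them.
import Mathlib
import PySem

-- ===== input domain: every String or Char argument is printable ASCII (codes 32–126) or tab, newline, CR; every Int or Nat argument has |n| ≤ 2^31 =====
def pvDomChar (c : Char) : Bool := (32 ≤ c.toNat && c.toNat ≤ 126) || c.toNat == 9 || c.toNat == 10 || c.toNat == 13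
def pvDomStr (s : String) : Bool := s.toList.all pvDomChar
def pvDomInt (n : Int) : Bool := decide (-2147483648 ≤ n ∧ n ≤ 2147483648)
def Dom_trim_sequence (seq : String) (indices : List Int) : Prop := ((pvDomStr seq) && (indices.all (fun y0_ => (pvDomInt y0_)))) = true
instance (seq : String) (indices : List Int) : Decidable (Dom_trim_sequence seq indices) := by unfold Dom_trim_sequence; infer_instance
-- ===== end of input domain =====

-- B replaces A's per-character membership scan by sorting the distinct in-range removal
-- positions once and concatenating the kept slices between them (faster; measured by the check).


-- ===== PORT A =====
-- for i,res in enumerate(seq): if i in indices: pass else: new_seq += res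
def trim_sequence (seq : String) (indices : List Int) : String :=
  String.ofList ((PySem.List.enumerate seq.toList 0).foldl
    (fun new_seq p => if p.1 ∈ indices then new_seq else new_seq ++ [p.2]) [])

-- ===== PORT B =====
-- positions = sorted(set(i for i in indices if 0 <= i < len(seq))); copy the kept slices
def trim_sequence_alt (seq : String) (indices : List Int) : String :=
  let cs := seq.toList
  let positions := PySem.List.sorted
    (PySem.Set.ofList (indices.filter (fun i => decide (0 ≤ i ∧ i < (cs.length : Int)))))
    (fun x => x) false
  let st := positions.foldl
    (fun (st : List (List Char) × Int) pos =>
      (st.1 ++ [PySem.List.slice cs (some st.2) (some pos)], pos + 1)) ([], 0)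
  String.ofList (PySem.Chars.join [] (st.1 ++ [PySem.List.slice cs (some st.2) none]))

-- ===== PRECONDITION & SPEC =====
def Spec_trim_sequence (seq : String) (indices : List Int) (out : String) : Prop := out = trim_sequence_alt seq indices
instance (seq : String) (indices : List Int) (out : String) : Decidable (Spec_trim_sequence seq indices out) := by unfold Spec_trim_sequence; infer_instance

-- ===== CLAIM (what is proved, stated in full; the proofs are below) =====
def Claim_equal_trim_sequence : Prop := ∀ (seq : String) (indices : List Int), Dom_trim_sequence seq indices → Spec_trim_sequence seq indices (trim_sequence seq indices)

-- ===== LEMMAS AND PROOFS =====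

-- the kept characters of l, starting at index i, dropping index j whenever m j = true
def keepF : List Char → (Int → Bool) → Int → List Char
  | [], _, _ => []
  | c :: rest, m, i => (if m i then [] else [c]) ++ keepF rest m (i + 1)

lemma keepF_congr (l : List Char) (m₁ m₂ : Int → Bool) (i : Int)
    (h : ∀ j : Nat, j < l.length → m₁ (i + j) = m₂ (i + j)) :
    keepF l m₁ i = keepF l m₂ i := by
  induction l generalizing i with
  | nil => rfl
  | cons c rest ih =>
    have h0 : m₁ i = m₂ i := by simpa using h 0 (by simp)
    have hrest : keepF rest m₁ (i + 1) = keepF rest m₂ (i + 1) := by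
      refine ih (i + 1) (fun j hj => ?_)
      have := h (j + 1) (by simpa using Nat.succ_lt_succ hj)
      have hc : i + 1 + (j : Int) = i + ((j + 1 : Nat) : Int) := by push_cast; ring
      rw [hc]; exact this
    simp [keepF, h0, hrest]

lemma keepF_take (t : Nat) : ∀ (l : List Char) (m : Int → Bool) (i : Int),
    (∀ j : Nat, j < t → m (i + j) = false) →
    keepF l m i = l.take t ++ keepF (l.drop t) m (i + t) := by
  induction t with
  | zero => intro l m i _; simp
  | succ t ih =>
    intro l m i h
    cases l with
    | nil => simp [keepF]
    | cons c rest =>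
      have h0 : m i = false := by simpa using h 0 (by omega)
      have hrest := ih rest m (i + 1) (fun j hj => by
        have := h (j + 1) (by omega)
        have hc : i + 1 + (j : Int) = i + ((j + 1 : Nat) : Int) := by push_cast; ring
        rw [hc]; exact this)
      have hc2 : i + 1 + (t : Int) = i + ((t + 1 : Nat) : Int) := by push_cast; ring
      simp [keepF, h0, hrest, hc2]

-- the kept runs between the (sorted) removal positions, starting at cursor prev
def segGo (cs : List Char) : List Int → Int → List Char
  | [], prev => PySem.List.slice cs (some prev) none
  | p :: ps, prev => PySem.List.slice cs (some prev) (some p) ++ segGo cs ps (p + 1)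

lemma segGo_eq_keepF (cs : List Char) : ∀ (ps : List Int) (prev : Int), 0 ≤ prev →
    ps.Pairwise (· < ·) → (∀ p ∈ ps, prev ≤ p ∧ p < (cs.length : Int)) →
    segGo cs ps prev = keepF (cs.drop prev.toNat) (fun i => decide (i ∈ ps)) prev := by
  intro ps
  induction ps with
  | nil =>
    intro prev h0 _ _
    rw [segGo, PySem.List.slice_from cs h0]
    rw [keepF_take (cs.drop prev.toNat).length _ _ prev (by intro j _; simp)]
    have h1 : List.drop (prev.toNat + (cs.length - prev.toNat)) cs = [] :=
      List.drop_eq_nil_of_le (by omega)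
    have h2 : List.take (cs.length - prev.toNat) (List.drop prev.toNat cs)
        = List.drop prev.toNat cs := List.take_of_length_le (by simp)
    simp only [List.drop_drop, List.length_drop] at *
    rw [h1, h2]; simp [keepF]
  | cons p ps ih =>
    intro prev h0 hsort hmem
    have hp := hmem p (List.mem_cons_self ..)
    have hp0 : (0 : Int) ≤ p := le_trans h0 hp.1
    have hprev : prev.toNat ≤ p.toNat := by omega
    have hplen : p.toNat < cs.length := by omega
    have htail : ∀ q ∈ ps, p < q := (List.pairwise_cons.mp hsort).1
    rw [segGo, PySem.List.slice_toNat cs h0 hp0]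
    set t := p.toNat - prev.toNat with ht
    have hfalse : ∀ j : Nat, j < t → decide ((prev + (j : Int)) ∈ p :: ps) = false := by
      intro j hj
      have hlt : prev + (j : Int) < p := by omega
      simp only [decide_eq_false_iff_not, List.mem_cons]
      rintro (rfl | hq)
      · omega
      · exact absurd (htail _ hq) (by omega)
    rw [keepF_take t _ _ prev hfalse]
    have hdd : (cs.drop prev.toNat).drop t = cs.drop p.toNat := by
      rw [List.drop_drop]; congr 1; omega
    have hpt : prev + (t : Int) = p := by omega
    rw [hdd, hpt]
    have hcons : cs.drop p.toNat = cs[p.toNat] :: cs.drop (p.toNat + 1) :=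
      List.drop_eq_getElem_cons hplen
    rw [hcons]
    have hself : decide (p ∈ p :: ps) = true := by simp
    rw [show keepF (cs[p.toNat] :: cs.drop (p.toNat + 1)) (fun i => decide (i ∈ p :: ps)) p
        = keepF (cs.drop (p.toNat + 1)) (fun i => decide (i ∈ p :: ps)) (p + 1) by
      simp [keepF]]
    have hcg : keepF (cs.drop (p.toNat + 1)) (fun i => decide (i ∈ p :: ps)) (p + 1)
        = keepF (cs.drop (p.toNat + 1)) (fun i => decide (i ∈ ps)) (p + 1) := by
      refine keepF_congr _ _ _ _ (fun j _ => ?_)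
      have hne : p + 1 + (j : Int) ≠ p := by omega
      simp [List.mem_cons, hne]
    have hih := ih (p + 1) (by omega) (List.pairwise_cons.mp hsort).2
      (fun q hq => ⟨by have := htail q hq; omega, (hmem q (List.mem_cons_of_mem _ hq)).2⟩)
    have htn : (p + 1).toNat = p.toNat + 1 := by omega
    rw [hcg, ← htn, ← hih]

-- join with empty separator is flatten
lemma join_nil_flatten (parts : List (List Char)) : PySem.Chars.join [] parts = parts.flatten := by
  induction parts with
  | nil => simp [PySem.Chars.join_nil]
  | cons p ps ih =>
    cases ps with
    | nil => simp [PySem.Chars.join_singleton]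
    | cons q qs =>
      rw [PySem.Chars.join_cons_cons] at *
      simp [ih]

-- B's parts-accumulating loop computes the flattened kept runs
lemma foldB_eq_segGo (cs : List Char) : ∀ (ps : List Int) (parts : List (List Char)) (prev : Int),
    PySem.Chars.join []
      ((ps.foldl (fun (st : List (List Char) × Int) pos =>
          (st.1 ++ [PySem.List.slice cs (some st.2) (some pos)], pos + 1)) (parts, prev)).1
        ++ [PySem.List.slice cs
          (some (ps.foldl (fun (st : List (List Char) × Int) pos =>
            (st.1 ++ [PySem.List.slice cs (some st.2) (some pos)], pos + 1)) (parts, prev)).2) none])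
    = parts.flatten ++ segGo cs ps prev := by
  intro ps
  induction ps with
  | nil => intro parts prev; simp [segGo, join_nil_flatten]
  | cons p ps ih =>
    intro parts prev
    simp only [List.foldl_cons]
    rw [ih (parts ++ [PySem.List.slice cs (some prev) (some p)]) (p + 1)]
    simp [segGo]

-- A's loop computes keepF
lemma foldA_eq_keepF (indices : List Int) : ∀ (l : List Char) (s : Int) (acc : List Char),
    (PySem.List.enumerate l s).foldl
      (fun new_seq p => if p.1 ∈ indices then new_seq else new_seq ++ [p.2]) acc
    = acc ++ keepF l (fun i => decide (i ∈ indices)) s := by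
  intro l
  induction l with
  | nil => intro s acc; simp [PySem.List.enumerate_nil, keepF]
  | cons c rest ih =>
    intro s acc
    rw [PySem.List.enumerate_cons, List.foldl_cons, ih]
    by_cases h : s ∈ indices <;> simp [keepF, h]

-- ===== VERDICT (by name: the statement is the Claim_ definition above) =====
theorem trim_sequence_spec : Claim_equal_trim_sequence := by
  intro seq indices _
  unfold Spec_trim_sequence trim_sequence trim_sequence_alt
  set cs := seq.toList with hcs
  set filtered := indices.filter (fun i => decide (0 ≤ i ∧ i < (cs.length : Int))) with hfil
  set positions := PySem.List.sorted (PySem.Set.ofList filtered) (fun x => x) false with hposdef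
  have hmemP : ∀ x : Int, x ∈ positions ↔ (x ∈ indices ∧ 0 ≤ x ∧ x < (cs.length : Int)) := by
    intro x
    rw [hposdef, PySem.List.mem_sorted, PySem.Set.mem_ofList, hfil, List.mem_filter]
    simp
  have hsort : positions.Pairwise (· < ·) := PySem.List.sorted_ofList_pairwise_lt filtered
  have hbound : ∀ p ∈ positions, (0 : Int) ≤ p ∧ p < (cs.length : Int) :=
    fun p hp => ((hmemP p).mp hp).2
  simp only []
  rw [foldA_eq_keepF, List.nil_append, foldB_eq_segGo, List.flatten_nil, List.nil_append]
  rw [segGo_eq_keepF cs positions 0 le_rfl hsort hbound]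
  congr 1
  rw [Int.toNat_zero, List.drop_zero]
  refine keepF_congr _ _ _ _ (fun j hj => ?_)
  have hiff : ((0 : Int) + (j : Int)) ∈ positions ↔ ((0 : Int) + (j : Int)) ∈ indices := by
    rw [hmemP]
    constructor
    · exact fun h => h.1
    · intro h; exact ⟨h, by omega, by omega⟩
  exact decide_eq_decide.mpr hiff.symm
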